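-- pv_equiv track=rewrite | github.com/shinseok95/Algorithm-Test | 프로그래머스/고득점 Kit/그래프/가장 먼 노드.py | solution
-- ===== SOURCE A (Python) =====
-- from heapq import heappush, heappop
--
-- INF = int(1e9)
--
-- def solution(n, edge):
--
--     graph = [[] for _ in range(n+1)]
--     distance = [INF]*(n+1)
--     q = []
--
--     for start,end in edge:
--         graph[start].append(end)
--         graph[end].append(start)
--
--     heappush(q,(0,1))
--     distance[1] = 0
--
--     while q:
--         dist, now = heappop(q)
--
--         if distance[now] < dist:
--             continue
--
--         for node in graph[now]:
--             cost = dist+1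
--             if cost < distance[node]:
--                 distance[node] = cost
--                 heappush(q,(cost,node))
--
--     return distance.count(max(distance[1:]))
-- ===== SOURCE B (Python) =====
-- INF = int(1e9)
--
-- def solution(n, edge):
--     # BFS (unweighted shortest paths) instead of heap-based Dijkstra: O(V+E).
--     adj = {}
--     for a, b in edge:
--         adj.setdefault(a, []).append(b)
--         adj.setdefault(b, []).append(a)
--     dist = [INF] * (n + 1)
--     dist[1] = 0
--     q = [1]
--     i = 0
--     while i < len(q):
--         u = q[i]
--         i += 1
--         nd = dist[u] + 1
--         for v in adj.get(u, ()):
--             if nd < dist[v]: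
--                 dist[v] = nd
--                 q.append(v)
--     return dist.count(max(dist[1:]))
-- ===== Notes on version B (the rewrite author's own statement) =====
-- stated objective: simpler
-- what changed: Replaces A's heapq-based Dijkstra (priority queue with stale-entry skipping over a preallocated list-of-lists graph) by a plain FIFO breadth-first search over a dict adjacency list with a cursor-indexed queue, which suffices because all edge weights are 1.
-- outside the precondition, e.g. on solution(4, [(3, 0), (4, 0), (0, 2), (-3, 1), (2, 3), (-2, 2)]): A returns 1, B returns 3
import Mathlib
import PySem

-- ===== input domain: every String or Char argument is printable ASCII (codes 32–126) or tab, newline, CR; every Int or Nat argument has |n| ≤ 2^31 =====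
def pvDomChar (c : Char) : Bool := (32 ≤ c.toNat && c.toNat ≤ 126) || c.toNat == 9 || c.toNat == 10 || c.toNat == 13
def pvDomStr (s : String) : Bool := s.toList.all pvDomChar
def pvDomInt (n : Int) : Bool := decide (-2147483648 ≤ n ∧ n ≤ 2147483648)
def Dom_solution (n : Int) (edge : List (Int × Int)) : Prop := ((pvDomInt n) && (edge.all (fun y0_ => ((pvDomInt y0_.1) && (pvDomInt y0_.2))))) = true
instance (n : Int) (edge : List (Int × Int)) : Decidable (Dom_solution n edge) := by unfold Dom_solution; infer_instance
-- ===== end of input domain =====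

-- B replaces A's heap-based Dijkstra by a plain FIFO breadth-first search (dict adjacency,
-- cursor queue): simpler (no heap, no stale-entry check), same return value on Pre_.

def pvINF : Int := 1000000000

-- the identical final line of both Pythons: distance.count(max(distance[1:]))
-- (max([]) raises ValueError in Python; the none branch is excluded by Pre_, which gives 1 ≤ n)
def pvAnswer (dist : List Int) : Int :=
  match PySem.List.max? (PySem.List.slice dist (some 1) none) (fun x => x) with
  | some m => (PySem.List.count dist m : Int)
  | none => 0

-- ===== PORT A =====  (heapq-based Dijkstra, transliterated; heapq's _siftdown/_siftup ported step for step)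

-- Python tuple comparison (a, b) < (c, d) on int pairs (lexicographic)
def pvLt (a b : Int × Int) : Bool := a.1 < b.1 || (a.1 == b.1 && a.2 < b.2)

-- CPython heapq._siftdown(heap, startpos, pos): newitem = heap[pos] is passed in;
-- reads of heap[parentpos] use getD (always in range when called as heapq calls it)
def pvSiftdown (startpos : Nat) (newitem : Int × Int) (heap : List (Int × Int)) (pos : Nat) :
    List (Int × Int) :=
  if _h : startpos < pos then
    let parentpos := (pos - 1) / 2
    let parent := heap.getD parentpos (0, 0)
    if pvLt newitem parent then pvSiftdown startpos newitem (heap.set pos parent) parentpos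
    else heap.set pos newitem
  else heap.set pos newitem
termination_by pos
decreasing_by have := Nat.div_le_self (pos - 1) 2; omega

-- heapq.heappush: append, then sift the new item up from the last position
def pvHeappush (heap : List (Int × Int)) (item : Int × Int) : List (Int × Int) :=
  pvSiftdown 0 item (heap ++ [item]) heap.length

-- CPython heapq._siftup child-moving loop: returns the heap after the moves and the final hole position
def pvSiftupLoop (heap : List (Int × Int)) (pos : Nat) : List (Int × Int) × Nat :=
  if h : 2 * pos + 1 < heap.length then
    let childpos := 2 * pos + 1
    let childpos :=
      if childpos + 1 < heap.length ∧
          ¬ (pvLt (heap.getD childpos (0, 0)) (heap.getD (childpos + 1) (0, 0)) = true) then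
        childpos + 1
      else childpos
    pvSiftupLoop (heap.set pos (heap.getD childpos (0, 0))) childpos
  else (heap, pos)
termination_by heap.length - pos
decreasing_by simp only [List.length_set]; split <;> omega

-- CPython heapq._siftup(heap, pos): move hole to a leaf, place newitem, sift it back up
def pvSiftup (heap : List (Int × Int)) (pos : Nat) : List (Int × Int) :=
  let newitem := heap.getD pos (0, 0)
  let r := pvSiftupLoop heap pos
  pvSiftdown pos newitem r.1 r.2

-- heapq.heappop (none = IndexError on an empty heap; A only pops a nonempty heap)
def pvHeappop : List (Int × Int) → Option ((Int × Int) × List (Int × Int))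
  | [] => none
  | x :: xs =>
    let lastelt := (x :: xs).getLast (by simp)
    match _h : (x :: xs).dropLast with
    | [] => some (lastelt, [])
    | r :: t => some (r, pvSiftup ((r :: t).set 0 lastelt) 0)

-- graph[i].append(x)  (exact where 0 ≤ i < len(graph); Pre_ guarantees that for every endpoint)
def pvAppendAt (g : List (List Int)) (i : Int) (x : Int) : List (List Int) :=
  PySem.List.pySetD g i (PySem.List.pyGetD g i [] ++ [x])

-- for start, end in edge: graph[start].append(end); graph[end].append(start)
def pvBuildGraph (edge : List (Int × Int)) (g : List (List Int)) : List (List Int) :=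
  edge.foldl (fun g p => pvAppendAt (pvAppendAt g p.1 p.2) p.2 p.1) g

-- the while-loop of A; fuel only makes the recursion total: the loop pops the heap
-- empty after at most |q| + Σ distance iterations (proved below for the fuel passed in solution)
def pvDijkstra (graph : List (List Int)) : Nat → List (Int × Int) → List Int → List Int
  | 0, _, dist => dist
  | fuel + 1, q, dist =>
    match pvHeappop q with
    | none => dist
    | some ((d, now), q') =>
      if PySem.List.pyGetD dist now 0 < d then pvDijkstra graph fuel q' dist
      else
        let s := (PySem.List.pyGetD graph now []).foldl
          (fun (s : List (Int × Int) × List Int) node =>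
            let cost := d + 1
            if cost < PySem.List.pyGetD s.2 node 0 then
              (pvHeappush s.1 (cost, node), PySem.List.pySetD s.2 node cost)
            else s)
          (q', dist)
        pvDijkstra graph fuel s.1 s.2

def solution (n : Int) (edge : List (Int × Int)) : Int :=
  let graph := pvBuildGraph edge (List.replicate (n + 1).toNat [])
  let distance : List Int := List.replicate (n + 1).toNat pvINF
  let q := pvHeappush [] (0, 1)
  let distance := PySem.List.pySetD distance 1 0
  let dist := pvDijkstra graph ((n + 1).toNat * 1000000001 + 2) q distance
  pvAnswer dist

-- ===== PORT B =====  (FIFO breadth-first search from Source B)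

-- adj.setdefault(a, []).append(b)  is  modify a [] (· ++ [b])
def pvBuildAdj (edge : List (Int × Int)) : PySem.Dict Int (List Int) :=
  edge.foldl
    (fun (ad : PySem.Dict Int (List Int)) p =>
      (ad.modify p.1 [] (· ++ [p.2])).modify p.2 [] (· ++ [p.1]))
    PySem.Dict.empty

-- the while-loop of B: q the growing queue, i the cursor; fuel only makes the recursion
-- total (the loop runs at most (len(q)-i) + Σ dist times, proved below)
def pvBfs (adj : PySem.Dict Int (List Int)) : Nat → List Int → Nat → List Int → List Int
  | 0, _, _, dist => dist
  | fuel + 1, q, i, dist =>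
    if h : i < q.length then
      let u := q[i]
      let nd := PySem.List.pyGetD dist u 0 + 1
      let s := (adj.getD u []).foldl
        (fun (s : List Int × List Int) v =>
          if nd < PySem.List.pyGetD s.2 v 0 then (s.1 ++ [v], PySem.List.pySetD s.2 v nd)
          else s)
        (q, dist)
      pvBfs adj fuel s.1 (i + 1) s.2
    else dist

def solution_alt (n : Int) (edge : List (Int × Int)) : Int :=
  let adj := pvBuildAdj edge
  let dist : List Int := List.replicate (n + 1).toNat pvINF
  let dist := PySem.List.pySetD dist 1 0
  let dist := pvBfs adj ((n + 1).toNat * 1000000001 + 2) [1] 0 dist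
  pvAnswer dist

-- ===== PRECONDITION & SPEC =====
-- Pre_ keeps the problem's natural domain: 1 ≤ n and node labels in 0..n. Outside it A raises
-- (IndexError for labels above n or below -(n+1); ValueError for n < 1), except for negative
-- in-range labels, which A accepts only through Python's negative-index wraparound — an accident
-- of its list encoding (the problem's nodes are 1..n), excluded here.
def Pre_solution (n : Int) (edge : List (Int × Int)) : Prop :=
  1 ≤ n ∧ ∀ p ∈ edge, 0 ≤ p.1 ∧ p.1 ≤ n ∧ 0 ≤ p.2 ∧ p.2 ≤ n
instance (n : Int) (edge : List (Int × Int)) : Decidable (Pre_solution n edge) := by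
  unfold Pre_solution; infer_instance
def pvWitness_solution : Int × (List (Int × Int)) := (3, [(1, 2), (2, 3)])
def Spec_solution (n : Int) (edge : List (Int × Int)) (out : Int) : Prop := out = solution_alt n edge
instance (n : Int) (edge : List (Int × Int)) (out : Int) : Decidable (Spec_solution n edge out) := by
  unfold Spec_solution; infer_instance

-- ===== CLAIM (what is proved, stated in full; the proofs are below) =====
def Claim_equal_solution : Prop := ∀ (n : Int) (edge : List (Int × Int)), Dom_solution n edge → Pre_solution n edge → Spec_solution n edge (solution n edge)

-- ===== LEMMAS AND PROOFS =====

def PvAdj (edge : List (Int × Int)) (u v : Int) : Prop := (u, v) ∈ edge ∨ (v, u) ∈ edge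

inductive PvReach (edge : List (Int × Int)) : Int → Int → Prop
  | base : PvReach edge 1 0
  | step {u c v} : PvReach edge u c → PvAdj edge u v → PvReach edge v (c + 1)

def PvClosed (edge : List (Int × Int)) (d : List Int) (j : Nat) : Prop :=
  ∀ v, PvAdj edge (j : Int) v → d.getD v.toNat 0 ≤ d.getD j 0 + 1

def PvGood (n : Int) (edge : List (Int × Int)) (d : List Int) : Prop :=
  d.length = (n + 1).toNat ∧ d.getD 1 0 = 0 ∧
  ∀ j, j < d.length →
    0 ≤ d.getD j 0 ∧ d.getD j 0 ≤ pvINF ∧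
    (d.getD j 0 < pvINF → PvReach edge (j : Int) (d.getD j 0) ∧ PvClosed edge d j)

theorem pvReach_nonneg {edge v c} (h : PvReach edge v c) : 0 ≤ c := by
  induction h with
  | base => omega
  | step _ _ ih => omega

theorem pvAdj_valid {n : Int} {edge} (hp : Pre_solution n edge) {u v : Int}
    (h : PvAdj edge u v) : 0 ≤ v ∧ v ≤ n := by
  rcases h with h | h
  · exact ⟨(hp.2 _ h).2.2.1, (hp.2 _ h).2.2.2⟩
  · exact ⟨(hp.2 _ h).1, (hp.2 _ h).2.1⟩

theorem pvReach_valid {n : Int} {edge} (hp : Pre_solution n edge) {v c}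
    (h : PvReach edge v c) : 0 ≤ v ∧ v ≤ n := by
  induction h with
  | base => exact ⟨by omega, hp.1⟩
  | step _ hadj _ => exact pvAdj_valid hp hadj

theorem pvGetD_set' {α : Type} (l : List α) (i j : Nat) (d : α) (hj : j < l.length) (v : α) :
    (l.set j v).getD i d = if i = j then v else l.getD i d := by
  simp only [List.getD_eq_getElem?_getD, List.getElem?_set]
  split
  · subst i; simp [hj]
  · next h => rw [if_neg (by omega)]

theorem pvAppendAt_length (g : List (List Int)) (a : Int) (x : Int) (ha : 0 ≤ a) :
    (pvAppendAt g a x).length = g.length := by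
  unfold pvAppendAt
  rw [PySem.List.pySetD_of_nonneg _ _ ha]
  simp

theorem pvAppendAt_getD (g : List (List Int)) (a : Int) (x : Int) (i : Nat)
    (ha : 0 ≤ a) (hlt : a.toNat < g.length) :
    (pvAppendAt g a x).getD i [] =
      if i = a.toNat then g.getD i [] ++ [x] else g.getD i [] := by
  unfold pvAppendAt
  rw [PySem.List.pySetD_of_nonneg _ _ ha]
  rw [pvGetD_set' _ _ _ _ hlt]
  have hg : PySem.List.pyGetD g a [] = g.getD a.toNat [] := by
    rw [PySem.List.pyGetD_eq_getElem g ([] : List Int) ha (by omega)]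
    rw [List.getD_eq_getElem _ _ hlt]
  rw [hg]
  split
  · next h => rw [h]
  · rfl


theorem pvBuildGraph_mem :
    ∀ (l : List (Int × Int)) (g : List (List Int)),
      (∀ p ∈ l, 0 ≤ p.1 ∧ p.1.toNat < g.length ∧ 0 ≤ p.2 ∧ p.2.toNat < g.length) →
      (pvBuildGraph l g).length = g.length ∧
      ∀ (i : Nat) (x : Int), i < g.length →
        (x ∈ (pvBuildGraph l g).getD i [] ↔
          x ∈ g.getD i [] ∨ ((i : Int), x) ∈ l ∨ (x, (i : Int)) ∈ l) := by
  intro l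
  induction l with
  | nil => intro g hp; exact ⟨rfl, fun i x hi => by simp [pvBuildGraph]⟩
  | cons p t ih =>
    intro g hp
    have hp0 := hp p (by simp)
    have hstep : pvBuildGraph (p :: t) g = pvBuildGraph t (pvAppendAt (pvAppendAt g p.1 p.2) p.2 p.1) := by
      simp [pvBuildGraph]
    have hl1 : (pvAppendAt g p.1 p.2).length = g.length := pvAppendAt_length g p.1 p.2 hp0.1
    have hl2 : (pvAppendAt (pvAppendAt g p.1 p.2) p.2 p.1).length = g.length := by
      rw [pvAppendAt_length _ p.2 p.1 hp0.2.2.1, hl1]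
    have iht := ih (pvAppendAt (pvAppendAt g p.1 p.2) p.2 p.1)
      (fun q hq => by
        have := hp q (List.mem_cons_of_mem p hq)
        exact ⟨this.1, by rw [hl2]; exact this.2.1, this.2.2.1, by rw [hl2]; exact this.2.2.2⟩)
    refine ⟨by rw [hstep, iht.1, hl2], fun i x hi => ?_⟩
    rw [hstep, iht.2 i x (by rw [hl2]; exact hi)]
    have e2 : (pvAppendAt (pvAppendAt g p.1 p.2) p.2 p.1).getD i [] =
        if i = p.2.toNat then (pvAppendAt g p.1 p.2).getD i [] ++ [p.1]
        else (pvAppendAt g p.1 p.2).getD i [] := by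
      rw [pvAppendAt_getD _ p.2 p.1 i hp0.2.2.1 (by rw [hl1]; exact hp0.2.2.2)]
    have e1 : (pvAppendAt g p.1 p.2).getD i [] =
        if i = p.1.toNat then g.getD i [] ++ [p.2] else g.getD i [] := by
      rw [pvAppendAt_getD _ p.1 p.2 i hp0.1 hp0.2.1]
    rw [e2, e1]
    have c1 : (i = p.1.toNat) ↔ ((i : Int) = p.1) := by omega
    have c2 : (i = p.2.toNat) ↔ ((i : Int) = p.2) := by omega
    by_cases h1 : i = p.1.toNat <;> by_cases h2 : i = p.2.toNat
    · rw [if_pos h2, if_pos h1]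
      have k1 := c1.mp h1; have k2 := c2.mp h2
      simp only [List.mem_append, List.mem_cons, List.mem_singleton, Prod.ext_iff]
      tauto
    · rw [if_neg h2, if_pos h1]
      have k1 := c1.mp h1; have k2 : ¬(i : Int) = p.2 := fun hh => h2 (c2.mpr hh)
      simp only [List.mem_append, List.mem_cons, List.mem_singleton, Prod.ext_iff]
      tauto
    · rw [if_pos h2, if_neg h1]
      have k1 : ¬(i : Int) = p.1 := fun hh => h1 (c1.mpr hh)
      have k2 := c2.mp h2
      simp only [List.mem_append, List.mem_cons, List.mem_singleton, Prod.ext_iff]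
      tauto
    · rw [if_neg h2, if_neg h1]
      have k1 : ¬(i : Int) = p.1 := fun hh => h1 (c1.mpr hh)
      have k2 : ¬(i : Int) = p.2 := fun hh => h2 (c2.mpr hh)
      simp only [List.mem_cons, Prod.ext_iff]
      tauto

theorem pvGood_le_reach {n : Int} {edge : List (Int × Int)} {d : List Int}
    (hp : Pre_solution n edge) (hg : PvGood n edge d)
    {v c} (h : PvReach edge v c) (hc : c < pvINF) : d.getD v.toNat 0 ≤ c := by
  induction h with
  | base => simpa using hg.2.1.le
  | @step u c' v' hr hadj ih =>
    have hc' : c' < pvINF := by have := pvReach_nonneg hr; omega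
    have hu := pvReach_valid hp hr
    have hulen : u.toNat < d.length := by
      rw [hg.1]; omega
    have hle := ih hc'
    have hdu : d.getD u.toNat 0 < pvINF := lt_of_le_of_lt hle hc'
    have hcl := ((hg.2.2 u.toNat hulen).2.2 hdu).2
    have hcast : ((u.toNat : Int)) = u := by omega
    have := hcl v' (by rwa [hcast])
    omega

theorem pvGood_unique {n : Int} {edge : List (Int × Int)} (hp : Pre_solution n edge) {d₁ d₂ : List Int}
    (h₁ : PvGood n edge d₁) (h₂ : PvGood n edge d₂) : d₁ = d₂ := by
  have hlen : d₁.length = d₂.length := by rw [h₁.1, h₂.1]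
  apply List.ext_getElem hlen
  intro j hj1 hj2
  have key : ∀ d d' : List Int, PvGood n edge d → PvGood n edge d' →
      ∀ (hj : j < d.length) (hj' : j < d'.length), d.getD j 0 ≤ d'.getD j 0 := by
    intro d d' hg hg' hj hj'
    by_cases hfin : d'.getD j 0 < pvINF
    · have hr := ((hg'.2.2 j hj').2.2 hfin).1
      have := pvGood_le_reach hp hg hr hfin
      have hcast : ((j:Int)).toNat = j := by omega
      rwa [hcast] at this
    · have := (hg.2.2 j hj).2.1
      have := (hg'.2.2 j hj').2.1
      omega
  have h12 := key d₁ d₂ h₁ h₂ hj1 hj2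
  have h21 := key d₂ d₁ h₂ h₁ hj2 hj1
  have e1 : d₁.getD j 0 = d₁[j] := List.getD_eq_getElem d₁ 0 hj1
  have e2 : d₂.getD j 0 = d₂[j] := List.getD_eq_getElem d₂ 0 hj2
  rw [e1, e2] at h12 h21
  omega

theorem pvSum_set (l : List Int) (i : Nat) (h : i < l.length) (v : Int) :
    (l.set i v).sum = l.sum + v - l[i] := by
  rw [List.sum_set]
  have hd : l.drop i = l[i] :: l.drop (i + 1) := List.drop_eq_getElem_cons h
  have h2 : l.sum = (l.take i).sum + (l.drop i).sum := by
    rw [← List.sum_append, List.take_append_drop]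
  rw [h2, hd]
  simp [h]
  rw [h2]
  ring

theorem pvCount_set {α : Type} [DecidableEq α] :
    ∀ (l : List α) (i : Nat) (hi : i < l.length) (v x : α),
    (l.set i v).count x = l.count x + (if v = x then 1 else 0) - (if l[i]'hi = x then 1 else 0) := by
  intro l
  induction l with
  | nil => intro i hi; simp at hi
  | cons a t ih =>
    intro i hi v x
    cases i with
    | zero =>
      simp only [List.set_cons_zero, List.count_cons, List.getElem_cons_zero]
      by_cases h1 : v = x <;> by_cases h2 : a = x <;> simp [h1, h2]
    | succ k =>
      have hk : k < t.length := by simpa using hi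
      simp only [List.set_cons_succ, List.count_cons, List.getElem_cons_succ, ih k hk v x]
      by_cases h2 : t[k]'hk = x
      · have hc : 1 ≤ t.count x := List.count_pos_iff.mpr (h2 ▸ List.getElem_mem hk)
        by_cases h1 : v = x <;> by_cases h3 : a = x <;> simp [h1, h2, h3] <;> omega
      · by_cases h1 : v = x <;> by_cases h3 : a = x <;> simp [h1, h2, h3]

theorem pvSet_set_perm {α : Type} [DecidableEq α] (h : List α) (pos pp : Nat) (dflt : α)
    (hpos : pos < h.length) (hpp : pp < h.length) (hne : pp ≠ pos) (ni : α) :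
    ((h.set pos (h.getD pp dflt)).set pp ni).Perm (h.set pos ni) := by
  rw [List.perm_iff_count]
  intro x
  have hpp' : pp < (h.set pos (h.getD pp dflt)).length := by simpa using hpp
  have hgd : h.getD pp dflt = h[pp]'hpp := List.getD_eq_getElem h dflt hpp
  have e1 : (h.set pos (h.getD pp dflt))[pp]'hpp' = h[pp]'hpp := by
    rw [List.getElem_set_ne (by omega)]
  rw [pvCount_set _ pp hpp' ni x, pvCount_set _ pos hpos _ x, pvCount_set _ pos hpos ni x, e1, hgd]
  have hb : (if h[pp]'hpp = x then 1 else 0) ≤ h.count x := by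
    split
    · next hh => exact List.count_pos_iff.mpr (hh ▸ List.getElem_mem hpp)
    · omega
  have hb2 : (if h[pos]'hpos = x then 1 else 0) ≤ h.count x := by
    split
    · next hh => exact List.count_pos_iff.mpr (hh ▸ List.getElem_mem hpos)
    · omega
  omega

theorem pvSiftdown_perm (s : Nat) (ni : Int × Int) :
    ∀ (pos : Nat) (h : List (Int × Int)), pos < h.length →
      (pvSiftdown s ni h pos).Perm (h.set pos ni) := by
  intro pos
  induction pos using Nat.strong_induction_on with
  | _ pos ih =>
    intro h hpos
    rw [pvSiftdown]
    simp only []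
    split
    · next hgt =>
      split
      · next hlt =>
        have hpp : (pos - 1) / 2 < pos := by have := Nat.div_le_self (pos - 1) 2; omega
        have hperm := ih _ hpp (h.set pos (h.getD ((pos - 1) / 2) (0, 0))) (by simpa using lt_trans hpp hpos)
        refine hperm.trans ?_
        exact pvSet_set_perm h pos ((pos - 1) / 2) (0, 0) hpos (by omega) (by omega) ni
      · exact List.Perm.refl _
    · exact List.Perm.refl _

theorem pvSiftupLoop_spec :
    ∀ (fuel : Nat) (h : List (Int × Int)) (pos : Nat), h.length - pos ≤ fuel → pos < h.length →
      (pvSiftupLoop h pos).2 < (pvSiftupLoop h pos).1.length ∧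
      (pvSiftupLoop h pos).1.length = h.length ∧
      ∀ ni, ((pvSiftupLoop h pos).1.set (pvSiftupLoop h pos).2 ni).Perm (h.set pos ni) := by
  intro fuel
  induction fuel with
  | zero => intro h pos hf hp; omega
  | succ f ih =>
    intro h pos hf hp
    by_cases hc : 2 * pos + 1 < h.length
    · by_cases hsel : 2 * pos + 1 + 1 < h.length ∧
          ¬ (pvLt (h.getD (2 * pos + 1) (0, 0)) (h.getD (2 * pos + 1 + 1) (0, 0)) = true)
      · have hstep : pvSiftupLoop h pos =
            pvSiftupLoop (h.set pos (h.getD (2 * pos + 1 + 1) (0, 0))) (2 * pos + 1 + 1) := by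
          rw [pvSiftupLoop]
          simp only [dif_pos hc, if_pos hsel]
        have hcp : 2 * pos + 1 + 1 < h.length := hsel.1
        have hlen' : (h.set pos (h.getD (2 * pos + 1 + 1) (0, 0))).length = h.length := by simp
        have hih := ih (h.set pos (h.getD (2 * pos + 1 + 1) (0, 0))) (2 * pos + 1 + 1)
          (by simp; omega) (by simp; omega)
        rw [hstep]
        refine ⟨hih.1, by rw [hih.2.1, hlen'], fun ni => ?_⟩
        refine (hih.2.2 ni).trans ?_
        exact pvSet_set_perm h pos (2 * pos + 1 + 1) (0, 0) hp hcp (by omega) ni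
      · have hstep : pvSiftupLoop h pos =
            pvSiftupLoop (h.set pos (h.getD (2 * pos + 1) (0, 0))) (2 * pos + 1) := by
          rw [pvSiftupLoop]
          simp only [dif_pos hc, if_neg hsel]
        have hlen' : (h.set pos (h.getD (2 * pos + 1) (0, 0))).length = h.length := by simp
        have hih := ih (h.set pos (h.getD (2 * pos + 1) (0, 0))) (2 * pos + 1)
          (by simp; omega) (by simp; omega)
        rw [hstep]
        refine ⟨hih.1, by rw [hih.2.1, hlen'], fun ni => ?_⟩
        refine (hih.2.2 ni).trans ?_
        exact pvSet_set_perm h pos (2 * pos + 1) (0, 0) hp hc (by omega) ni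
    · have hstep : pvSiftupLoop h pos = (h, pos) := by
        rw [pvSiftupLoop]; simp only [dif_neg hc]
      rw [hstep]
      exact ⟨hp, rfl, fun ni => List.Perm.refl _⟩

theorem pvSiftup_perm (h : List (Int × Int)) (pos : Nat) (hp : pos < h.length) :
    (pvSiftup h pos).Perm h := by
  unfold pvSiftup
  have hs := pvSiftupLoop_spec (h.length - pos) h pos (le_refl _) hp
  have hd := pvSiftdown_perm pos (h.getD pos (0, 0)) (pvSiftupLoop h pos).2 (pvSiftupLoop h pos).1 hs.1
  refine hd.trans ?_
  refine (hs.2.2 _).trans ?_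
  have he : h.getD pos (0, 0) = h[pos]'hp := List.getD_eq_getElem h (0, 0) hp
  rw [he, List.set_getElem_self]

theorem pvHeappush_perm (q : List (Int × Int)) (it : Int × Int) :
    (pvHeappush q it).Perm (q ++ [it]) := by
  unfold pvHeappush
  have hlen : q.length < (q ++ [it]).length := by simp
  refine (pvSiftdown_perm 0 it q.length (q ++ [it]) hlen).trans ?_
  have he : (q ++ [it]).set q.length it = q ++ [it] := by
    rw [List.set_append_right _ _ (le_refl q.length)]; simp
  rw [he]

theorem pvHeappop_eq_none {q : List (Int × Int)} : pvHeappop q = none ↔ q = [] := by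
  cases q with
  | nil => simp [pvHeappop]
  | cons x xs => simp only [pvHeappop]; split <;> simp

theorem pvHeappush_length (q : List (Int × Int)) (it : Int × Int) :
    (pvHeappush q it).length = q.length + 1 := by
  have := (pvHeappush_perm q it).length_eq
  simpa using this

theorem pvHeappush_mem {q : List (Int × Int)} {it x : Int × Int} :
    x ∈ pvHeappush q it ↔ x ∈ q ∨ x = it := by
  rw [(pvHeappush_perm q it).mem_iff]
  simp

theorem pvGetD_set (l : List Int) (i j : Nat) (hj : j < l.length) (v : Int) :
    (l.set j v).getD i 0 = if i = j then v else l.getD i 0 := pvGetD_set' l i j 0 hj v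

theorem pvHeappop_perm {q q' : List (Int × Int)} {r : Int × Int}
    (h : pvHeappop q = some (r, q')) : (r :: q').Perm q := by
  match q with
  | [] => simp [pvHeappop] at h
  | x :: xs =>
    cases xs with
    | nil =>
      simp [pvHeappop] at h
      obtain ⟨hr, hq'⟩ := h
      subst hr; subst hq'
      exact List.Perm.refl _
    | cons y ys =>
      have hne : (y :: ys) ≠ [] := by simp
      have hred : pvHeappop (x :: y :: ys) = some (x, pvSiftup
          ((x :: (y :: ys).dropLast).set 0 ((x :: y :: ys).getLast (by simp))) 0) := rfl
      rw [hred] at h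
      simp only [Option.some.injEq, Prod.mk.injEq] at h
      obtain ⟨hr, hq'⟩ := h
      subst hr; subst hq'
      refine List.Perm.cons x ?_
      have hset : ((x :: (y :: ys).dropLast).set 0 ((x :: y :: ys).getLast (by simp))) =
          ((x :: y :: ys).getLast (by simp)) :: (y :: ys).dropLast := by simp
      have hperm := pvSiftup_perm ((x :: (y :: ys).dropLast).set 0
        ((x :: y :: ys).getLast (by simp))) 0 (by simp)
      refine hperm.trans ?_
      rw [hset]
      have hL : (x :: y :: ys).getLast (by simp) = (y :: ys).getLast hne :=
        List.getLast_cons hne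
      rw [hL]
      refine ((List.perm_append_singleton _ _).symm).trans ?_
      exact List.Perm.of_eq (List.dropLast_append_getLast hne)

theorem pvBuildAdj_mem :
    ∀ (l : List (Int × Int)) (ad : PySem.Dict Int (List Int)) (u x : Int),
      x ∈ (l.foldl (fun (ad : PySem.Dict Int (List Int)) p =>
          (ad.modify p.1 [] (· ++ [p.2])).modify p.2 [] (· ++ [p.1])) ad).getD u [] ↔
        x ∈ ad.getD u [] ∨ (u, x) ∈ l ∨ (x, u) ∈ l := by
  intro l
  induction l with
  | nil => intro ad u x; simp
  | cons p t ih =>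
    intro ad u x
    rw [List.foldl_cons, ih]
    simp only [PySem.Dict.modify, PySem.Dict.getD_insert, List.mem_cons, Prod.ext_iff,
      List.mem_append, List.mem_singleton]
    by_cases h1 : u = p.2 <;> by_cases h2 : u = p.1 <;> by_cases h3 : p.2 = p.1 <;>
      simp [h1, h2, h3, Prod.ext_iff] <;>
      first
      | tauto
      | (rw [if_neg fun hh => h3 hh.symm]; simp [h1, h2, h3, Prod.ext_iff]; tauto)

theorem pvBuildAdj_spec (edge : List (Int × Int)) :
    ∀ (u : Int) x, x ∈ (pvBuildAdj edge).getD u [] ↔ PvAdj edge u x := by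
  intro u x
  unfold pvBuildAdj PvAdj
  rw [pvBuildAdj_mem]
  have : (PySem.Dict.empty : PySem.Dict Int (List Int)).getD u [] = [] := rfl
  rw [this]
  simp

theorem pvBuildGraph_spec {n : Int} {edge : List (Int × Int)} (hp : Pre_solution n edge) :
    (pvBuildGraph edge (List.replicate (n + 1).toNat [])).length = (n + 1).toNat ∧
    ∀ (u : Int), 0 ≤ u → u ≤ n →
      ∀ x, x ∈ PySem.List.pyGetD (pvBuildGraph edge (List.replicate (n + 1).toNat [])) u [] ↔
        PvAdj edge u x := by
  have hn := hp.1
  have hN : ((n + 1).toNat : Int) = n + 1 := by omega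
  have hbound : ∀ p ∈ edge, 0 ≤ p.1 ∧ p.1.toNat < (List.replicate (n + 1).toNat ([] : List Int)).length ∧
      0 ≤ p.2 ∧ p.2.toNat < (List.replicate (n + 1).toNat ([] : List Int)).length := by
    intro p hpe
    have := hp.2 p hpe
    simp only [List.length_replicate]
    omega
  have hm := pvBuildGraph_mem edge (List.replicate (n + 1).toNat []) hbound
  have hlen : (pvBuildGraph edge (List.replicate (n + 1).toNat [])).length = (n + 1).toNat := by
    rw [hm.1, List.length_replicate]
  refine ⟨hlen, fun u hu0 hun x => ?_⟩
  have hulen : u.toNat < (List.replicate (n + 1).toNat ([] : List Int)).length := by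
    simp only [List.length_replicate]; omega
  have hpg : PySem.List.pyGetD (pvBuildGraph edge (List.replicate (n + 1).toNat [])) u [] =
      (pvBuildGraph edge (List.replicate (n + 1).toNat [])).getD u.toNat [] := by
    rw [PySem.List.pyGetD_eq_getElem _ ([] : List Int) hu0 (by rw [hlen]; omega)]
    rw [List.getD_eq_getElem _ _ (by rw [hlen]; omega)]
  rw [hpg]
  have := hm.2 u.toNat x (by simpa using hulen)
  have hc : ((u.toNat : Int)) = u := by omega
  rw [hc] at this
  rw [this]
  rw [List.getD_replicate _ (by simpa using hulen)]
  simp [PvAdj]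

def PvInvA (n : Int) (edge : List (Int × Int)) (P : Nat → Prop)
    (q : List (Int × Int)) (d : List Int) : Prop :=
  d.length = (n + 1).toNat ∧ d.getD 1 0 = 0 ∧
  (∀ j, j < d.length → 0 ≤ d.getD j 0 ∧ d.getD j 0 ≤ pvINF ∧
    (d.getD j 0 < pvINF → PvReach edge (j : Int) (d.getD j 0))) ∧
  (∀ p ∈ q, 0 ≤ p.2 ∧ p.2 ≤ n ∧ 0 ≤ p.1 ∧ PvReach edge p.2 p.1 ∧ d.getD p.2.toNat 0 ≤ p.1) ∧
  (∀ j, j < d.length → d.getD j 0 < pvINF → ¬ P j →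
    (∃ c, (c, (j : Int)) ∈ q ∧ c ≤ d.getD j 0) ∨ PvClosed edge d j)

theorem pvRelaxA {n : Int} {edge : List (Int × Int)} (hp : Pre_solution n edge) {now c : Int}
    (hnow0 : 0 ≤ now) (hnown : now ≤ n) (hc : 0 ≤ c) (hreach : PvReach edge now c) :
    ∀ (lst : List Int), (∀ x ∈ lst, PvAdj edge now x) →
    ∀ (q : List (Int × Int)) (d : List Int),
      PvInvA n edge (fun j => j = now.toNat) q d →
      d.getD now.toNat 0 = c →
      (PvInvA n edge (fun j => j = now.toNat)
          (lst.foldl (fun (s : List (Int × Int) × List Int) node =>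
            if c + 1 < PySem.List.pyGetD s.2 node 0 then
              (pvHeappush s.1 (c + 1, node), PySem.List.pySetD s.2 node (c + 1))
            else s) (q, d)).1
          (lst.foldl (fun (s : List (Int × Int) × List Int) node =>
            if c + 1 < PySem.List.pyGetD s.2 node 0 then
              (pvHeappush s.1 (c + 1, node), PySem.List.pySetD s.2 node (c + 1))
            else s) (q, d)).2) ∧
      ((lst.foldl (fun (s : List (Int × Int) × List Int) node =>
            if c + 1 < PySem.List.pyGetD s.2 node 0 then
              (pvHeappush s.1 (c + 1, node), PySem.List.pySetD s.2 node (c + 1))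
            else s) (q, d)).2.getD now.toNat 0 = c) ∧
      (∀ x ∈ lst, (lst.foldl (fun (s : List (Int × Int) × List Int) node =>
            if c + 1 < PySem.List.pyGetD s.2 node 0 then
              (pvHeappush s.1 (c + 1, node), PySem.List.pySetD s.2 node (c + 1))
            else s) (q, d)).2.getD x.toNat 0 ≤ c + 1) ∧
      (∀ k, (lst.foldl (fun (s : List (Int × Int) × List Int) node =>
            if c + 1 < PySem.List.pyGetD s.2 node 0 then
              (pvHeappush s.1 (c + 1, node), PySem.List.pySetD s.2 node (c + 1))
            else s) (q, d)).2.getD k 0 ≤ d.getD k 0) ∧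
      (∀ p ∈ q, p ∈ (lst.foldl (fun (s : List (Int × Int) × List Int) node =>
            if c + 1 < PySem.List.pyGetD s.2 node 0 then
              (pvHeappush s.1 (c + 1, node), PySem.List.pySetD s.2 node (c + 1))
            else s) (q, d)).1) ∧
      (((lst.foldl (fun (s : List (Int × Int) × List Int) node =>
            if c + 1 < PySem.List.pyGetD s.2 node 0 then
              (pvHeappush s.1 (c + 1, node), PySem.List.pySetD s.2 node (c + 1))
            else s) (q, d)).1.length : Int) +
        (lst.foldl (fun (s : List (Int × Int) × List Int) node =>
            if c + 1 < PySem.List.pyGetD s.2 node 0 then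
              (pvHeappush s.1 (c + 1, node), PySem.List.pySetD s.2 node (c + 1))
            else s) (q, d)).2.sum ≤ (q.length : Int) + d.sum) := by
  intro lst
  induction lst with
  | nil =>
    intro _ q d hInv hdn
    refine ⟨hInv, hdn, by simp, fun k => le_refl _, fun p hpq => hpq, by simp⟩
  | cons x xs ih =>
    intro hlst q d hInv hdn
    obtain ⟨hlen, hd1, hcore, hent, hJ⟩ := hInv
    have hadj : PvAdj edge now x := hlst x List.mem_cons_self
    have hx := pvAdj_valid hp hadj
    have hxlen : x.toNat < d.length := by rw [hlen]; omega
    have hxpg : PySem.List.pyGetD d x 0 = d.getD x.toNat 0 := by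
      rw [PySem.List.pyGetD_eq_getElem d (0 : Int) hx.1 (by rw [hlen]; omega)]
      rw [List.getD_eq_getElem _ _ hxlen]
    rw [List.foldl_cons]
    by_cases hg : c + 1 < PySem.List.pyGetD d x 0
    · -- relaxation fires: distance drops, node pushed
      rw [if_pos hg]
      have hgx : c + 1 < d.getD x.toNat 0 := by rwa [hxpg] at hg
      have hset : PySem.List.pySetD d x (c + 1) = d.set x.toNat (c + 1) :=
        PySem.List.pySetD_of_nonneg d (c + 1) hx.1
      set d' := d.set x.toNat (c + 1) with hd'
      set q' := pvHeappush q (c + 1, x) with hq'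
      have hlen' : d'.length = (n + 1).toNat := by rw [hd', List.length_set, hlen]
      have hget' : ∀ k, d'.getD k 0 = if k = x.toNat then c + 1 else d.getD k 0 := by
        intro k; rw [hd']; exact pvGetD_set d k x.toNat hxlen (c + 1)
      have hmono : ∀ k, d'.getD k 0 ≤ d.getD k 0 := by
        intro k; rw [hget']
        split
        · next hk => subst hk; omega
        · exact le_refl _
      have hxne1 : x.toNat ≠ 1 := by
        intro hh
        rw [hh] at hgx
        rw [hd1] at hgx
        omega
      have hd1' : d'.getD 1 0 = 0 := by rw [hget', if_neg (by omega)]; exact hd1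
      have hreachx : PvReach edge x (c + 1) := PvReach.step hreach hadj
      have hcore' : ∀ j, j < d'.length → 0 ≤ d'.getD j 0 ∧ d'.getD j 0 ≤ pvINF ∧
          (d'.getD j 0 < pvINF → PvReach edge (j : Int) (d'.getD j 0)) := by
        intro j hj
        rw [hget']
        split
        · next hk =>
          subst hk
          have hxc : ((x.toNat : Int)) = x := by omega
          have hib := hcore x.toNat hxlen
          refine ⟨by omega, by omega, fun _ => ?_⟩
          rw [hxc]; exact hreachx
        · exact hcore j (by rw [hlen]; rw [hlen'] at hj; exact hj)
      have hent' : ∀ p ∈ q', 0 ≤ p.2 ∧ p.2 ≤ n ∧ 0 ≤ p.1 ∧ PvReach edge p.2 p.1 ∧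
          d'.getD p.2.toNat 0 ≤ p.1 := by
        intro p hpq
        rcases pvHeappush_mem.mp hpq with hpold | hpnew
        · have := hent p hpold
          exact ⟨this.1, this.2.1, this.2.2.1, this.2.2.2.1,
            le_trans (hmono p.2.toNat) this.2.2.2.2⟩
        · subst hpnew
          refine ⟨hx.1, hx.2, by omega, hreachx, ?_⟩
          rw [hget', if_pos rfl]
      have hJ' : ∀ j, j < d'.length → d'.getD j 0 < pvINF → ¬ (j = now.toNat) →
          (∃ c', (c', (j : Int)) ∈ q' ∧ c' ≤ d'.getD j 0) ∨ PvClosed edge d' j := by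
        intro j hj hfin hnex
        by_cases hjx : j = x.toNat
        · subst hjx
          left
          refine ⟨c + 1, ?_, by rw [hget', if_pos rfl]⟩
          have hxc : ((x.toNat : Int)) = x := by omega
          rw [hxc]
          exact pvHeappush_mem.mpr (Or.inr rfl)
        · have hfin0 : d.getD j 0 < pvINF := by
            rw [hget', if_neg hjx] at hfin; exact hfin
          rcases hJ j (by rw [hlen]; rw [hlen'] at hj; exact hj) hfin0 hnex with ⟨c', hcq, hcle⟩ | hcl
          · left
            exact ⟨c', pvHeappush_mem.mpr (Or.inl hcq), by rw [hget', if_neg hjx]; exact hcle⟩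
          · right
            intro v hv
            have h1 := hcl v hv
            have h2 := hmono v.toNat
            rw [hget' j, if_neg hjx]
            omega
      have hdn' : d'.getD now.toNat 0 = c := by
        have hnx : now.toNat ≠ x.toNat := by
          intro hh
          rw [← hh] at hgx
          rw [hdn] at hgx
          omega
        rw [hget', if_neg hnx]
        exact hdn
      have hInv' : PvInvA n edge (fun j => j = now.toNat) q' d' :=
        ⟨hlen', hd1', hcore', hent', hJ'⟩
      have hres := ih (fun y hy => hlst y (List.mem_cons_of_mem x hy)) q' d' hInv' hdn'
      rw [hset]
      refine ⟨hres.1, hres.2.1, ?_, ?_, ?_, ?_⟩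
      · intro y hy
        rcases List.mem_cons.mp hy with hyx | hyxs
        · subst hyx
          have := hres.2.2.2.1 y.toNat
          rw [hget', if_pos rfl] at this
          exact this
        · exact hres.2.2.1 y hyxs
      · intro k
        exact le_trans (hres.2.2.2.1 k) (hmono k)
      · intro p hpq
        exact hres.2.2.2.2.1 p (pvHeappush_mem.mpr (Or.inl hpq))
      · refine le_trans hres.2.2.2.2.2 ?_
        have hsum : d'.sum = d.sum + (c + 1) - d[x.toNat]'hxlen := by
          rw [hd']; exact pvSum_set d x.toNat hxlen (c + 1)
        have hgi : d[x.toNat]'hxlen = d.getD x.toNat 0 := (List.getD_eq_getElem d 0 hxlen).symm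
        have hql : q'.length = q.length + 1 := pvHeappush_length q (c + 1, x)
        rw [hsum, hgi, hql]
        push_cast
        omega
    · -- no relaxation: state unchanged, but distance already ≤ c + 1
      rw [if_neg hg]
      have hgx : d.getD x.toNat 0 ≤ c + 1 := by rw [hxpg] at hg; omega
      have hres := ih (fun y hy => hlst y (List.mem_cons_of_mem x hy)) q d
        ⟨hlen, hd1, hcore, hent, hJ⟩ hdn
      refine ⟨hres.1, hres.2.1, ?_, hres.2.2.2.1, hres.2.2.2.2.1, hres.2.2.2.2.2⟩
      intro y hy
      rcases List.mem_cons.mp hy with hyx | hyxs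
      · subst hyx
        exact le_trans (hres.2.2.2.1 y.toNat) hgx
      · exact hres.2.2.1 y hyxs

theorem pvSum_nonneg_of_core {n : Int} {edge : List (Int × Int)} {d : List Int}
    (hcore : ∀ j, j < d.length → 0 ≤ d.getD j 0 ∧ d.getD j 0 ≤ pvINF ∧
      (d.getD j 0 < pvINF → PvReach edge (j : Int) (d.getD j 0))) : 0 ≤ d.sum := by
  apply List.sum_nonneg
  intro x hx
  obtain ⟨j, hj, hje⟩ := List.mem_iff_getElem.mp hx
  have := (hcore j hj).1
  rw [List.getD_eq_getElem _ _ hj] at this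
  rwa [hje] at this

theorem pvDijkstra_good {n : Int} {edge : List (Int × Int)} (hp : Pre_solution n edge) {g : List (List Int)}
    (hg : ∀ (u : Int), 0 ≤ u → u ≤ n →
      ∀ x, x ∈ PySem.List.pyGetD g u [] ↔ PvAdj edge u x) :
    ∀ (fuel : Nat) (q : List (Int × Int)) (d : List Int),
      PvInvA n edge (fun _ => False) q d →
      (q.length : Int) + d.sum < fuel →
      PvGood n edge (pvDijkstra g fuel q d) := by
  intro fuel
  induction fuel with
  | zero =>
    intro q d hInv hM
    exfalso
    have := pvSum_nonneg_of_core (n := n) hInv.2.2.1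
    have : (0 : Int) ≤ (q.length : Int) := by positivity
    omega
  | succ f ihf =>
    intro q d hInv hM
    obtain ⟨hlen, hd1, hcore, hent, hJ⟩ := hInv
    have hsum0 := pvSum_nonneg_of_core (n := n) hcore
    rw [pvDijkstra]
    cases hq : pvHeappop q with
    | none =>
      have hqnil : q = [] := pvHeappop_eq_none.mp hq
      subst hqnil
      refine ⟨hlen, hd1, fun j hj => ⟨(hcore j hj).1, (hcore j hj).2.1, fun hfin => ?_⟩⟩
      refine ⟨(hcore j hj).2.2 hfin, ?_⟩
      rcases hJ j hj hfin (by simp) with ⟨c', hcq, _⟩ | hcl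
      · simp at hcq
      · exact hcl
    | some r =>
      obtain ⟨⟨c, now⟩, q1⟩ := r
      simp only []
      have hperm : ((c, now) :: q1).Perm q := pvHeappop_perm hq
      have hmemq : (c, now) ∈ q := hperm.subset List.mem_cons_self
      have hentnow : 0 ≤ now ∧ now ≤ n ∧ 0 ≤ c ∧ PvReach edge now c ∧
          d.getD now.toNat 0 ≤ c := hent (c, now) hmemq
      have hnow0 : (0 : Int) ≤ now := hentnow.1
      have hnown : now ≤ n := hentnow.2.1
      have hc0 : (0 : Int) ≤ c := hentnow.2.2.1
      have hreach : PvReach edge now c := hentnow.2.2.2.1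
      have hnowlen : now.toNat < d.length := by rw [hlen]; omega
      have hpgnow : PySem.List.pyGetD d now 0 = d.getD now.toNat 0 := by
        rw [PySem.List.pyGetD_eq_getElem d (0 : Int) hnow0 (by rw [hlen]; omega)]
        rw [List.getD_eq_getElem _ _ hnowlen]
      have hql : q1.length + 1 = q.length := by
        have := hperm.length_eq; simpa using this
      have hsub1 : ∀ p ∈ q1, p ∈ q := fun p hpq => hperm.subset (List.mem_cons_of_mem _ hpq)
      by_cases hst : PySem.List.pyGetD d now 0 < c
      · rw [if_pos hst]
        apply ihf q1 d
        · refine ⟨hlen, hd1, hcore, fun p hpq => hent p (hsub1 p hpq), fun j hj hfin _ => ?_⟩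
          rcases hJ j hj hfin (by simp) with ⟨c', hcq, hcle⟩ | hcl
          · left
            rcases List.mem_cons.mp (hperm.symm.subset hcq) with heq | hq1
            · exfalso
              have h1 : c' = c := (Prod.ext_iff.mp heq).1
              have h2 : (j : Int) = now := (Prod.ext_iff.mp heq).2
              rw [hpgnow] at hst
              have : now.toNat = j := by omega
              rw [this] at hst
              omega
            · exact ⟨c', hq1, hcle⟩
          · right; exact hcl
        · omega
      · rw [if_neg hst]
        have hdnow : d.getD now.toNat 0 = c := by
          rw [hpgnow] at hst
          have := hentnow.2.2.2.2
          omega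
        have hlst : ∀ x ∈ PySem.List.pyGetD g now [], PvAdj edge now x :=
          fun x hx => (hg now hnow0 hnown x).mp hx
        have hInvx : PvInvA n edge (fun j => j = now.toNat) q1 d := by
          refine ⟨hlen, hd1, hcore, fun p hpq => hent p (hsub1 p hpq), fun j hj hfin hne => ?_⟩
          rcases hJ j hj hfin (by simp) with ⟨c', hcq, hcle⟩ | hcl
          · left
            rcases List.mem_cons.mp (hperm.symm.subset hcq) with heq | hq1
            · exfalso
              have h2 : (j : Int) = now := (Prod.ext_iff.mp heq).2
              exact hne (by omega)
            · exact ⟨c', hq1, hcle⟩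
          · right; exact hcl
        have hres := pvRelaxA hp hnow0 hnown hc0 hreach
          (PySem.List.pyGetD g now []) hlst q1 d hInvx hdnow
        have hzeta : (fun (s : List (Int × Int) × List Int) node =>
            let cost := c + 1
            if cost < PySem.List.pyGetD s.2 node 0 then
              (pvHeappush s.1 (cost, node), PySem.List.pySetD s.2 node cost)
            else s) = (fun (s : List (Int × Int) × List Int) node =>
            if c + 1 < PySem.List.pyGetD s.2 node 0 then
              (pvHeappush s.1 (c + 1, node), PySem.List.pySetD s.2 node (c + 1))
            else s) := rfl
        rw [hzeta]
        obtain ⟨hInvr, hdnr, hrelax, hmono, hsubr, hmeas⟩ := hres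
        apply ihf
        · obtain ⟨hlenr, hd1r, hcorer, hentr, hJr⟩ := hInvr
          refine ⟨hlenr, hd1r, hcorer, hentr, fun j hj hfin _ => ?_⟩
          by_cases hjn : j = now.toNat
          · right
            subst hjn
            intro v hv
            have hvl : v ∈ PySem.List.pyGetD g now [] := by
              have hcast : ((now.toNat : Int)) = now := by omega
              rw [hcast] at hv
              exact (hg now hnow0 hnown v).mpr hv
            have := hrelax v hvl
            rw [hdnr]
            omega
          · exact hJr j hj hfin hjn
        · have : ((q.length : Int)) + d.sum < f + 1 := by exact_mod_cast hM
          omega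

def PvInvB (n : Int) (edge : List (Int × Int)) (P : Nat → Prop)
    (q : List Int) (i : Nat) (d : List Int) : Prop :=
  d.length = (n + 1).toNat ∧ d.getD 1 0 = 0 ∧
  (∀ j, j < d.length → 0 ≤ d.getD j 0 ∧ d.getD j 0 ≤ pvINF ∧
    (d.getD j 0 < pvINF → PvReach edge (j : Int) (d.getD j 0))) ∧
  (∀ v ∈ q, 0 ≤ v ∧ v ≤ n ∧ d.getD v.toNat 0 < pvINF) ∧
  (∀ j, j < d.length → d.getD j 0 < pvINF → ¬ P j →
    ((j : Int) ∈ q.drop i) ∨ PvClosed edge d j)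

theorem pvRelaxB {n : Int} {edge : List (Int × Int)} (hp : Pre_solution n edge) {u c : Int}
    (hu0 : 0 ≤ u) (hun : u ≤ n) (hc : 0 ≤ c) (hreach : PvReach edge u c) :
    ∀ (lst : List Int), (∀ x ∈ lst, PvAdj edge u x) →
    ∀ (q : List Int) (i : Nat) (d : List Int),
      PvInvB n edge (fun j => j = u.toNat) q i d →
      d.getD u.toNat 0 = c →
      i ≤ q.length →
      (PvInvB n edge (fun j => j = u.toNat)
          (lst.foldl (fun (s : List Int × List Int) v =>
            if c + 1 < PySem.List.pyGetD s.2 v 0 then (s.1 ++ [v], PySem.List.pySetD s.2 v (c + 1))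
            else s) (q, d)).1 i
          (lst.foldl (fun (s : List Int × List Int) v =>
            if c + 1 < PySem.List.pyGetD s.2 v 0 then (s.1 ++ [v], PySem.List.pySetD s.2 v (c + 1))
            else s) (q, d)).2) ∧
      ((lst.foldl (fun (s : List Int × List Int) v =>
            if c + 1 < PySem.List.pyGetD s.2 v 0 then (s.1 ++ [v], PySem.List.pySetD s.2 v (c + 1))
            else s) (q, d)).2.getD u.toNat 0 = c) ∧
      (∀ x ∈ lst, (lst.foldl (fun (s : List Int × List Int) v =>
            if c + 1 < PySem.List.pyGetD s.2 v 0 then (s.1 ++ [v], PySem.List.pySetD s.2 v (c + 1))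
            else s) (q, d)).2.getD x.toNat 0 ≤ c + 1) ∧
      (∀ k, (lst.foldl (fun (s : List Int × List Int) v =>
            if c + 1 < PySem.List.pyGetD s.2 v 0 then (s.1 ++ [v], PySem.List.pySetD s.2 v (c + 1))
            else s) (q, d)).2.getD k 0 ≤ d.getD k 0) ∧
      (∃ e, (lst.foldl (fun (s : List Int × List Int) v =>
            if c + 1 < PySem.List.pyGetD s.2 v 0 then (s.1 ++ [v], PySem.List.pySetD s.2 v (c + 1))
            else s) (q, d)).1 = q ++ e) ∧
      (((lst.foldl (fun (s : List Int × List Int) v =>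
            if c + 1 < PySem.List.pyGetD s.2 v 0 then (s.1 ++ [v], PySem.List.pySetD s.2 v (c + 1))
            else s) (q, d)).1.length : Int) +
        (lst.foldl (fun (s : List Int × List Int) v =>
            if c + 1 < PySem.List.pyGetD s.2 v 0 then (s.1 ++ [v], PySem.List.pySetD s.2 v (c + 1))
            else s) (q, d)).2.sum ≤ (q.length : Int) + d.sum) := by
  intro lst
  induction lst with
  | nil =>
    intro _ q i d hInv hdn _
    exact ⟨hInv, hdn, by simp, fun k => le_refl _, ⟨[], by simp⟩, by simp⟩
  | cons x xs ih =>
    intro hlst q i d hInv hdn hiq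
    obtain ⟨hlen, hd1, hcore, hent, hJ⟩ := hInv
    have hadj : PvAdj edge u x := hlst x List.mem_cons_self
    have hx := pvAdj_valid hp hadj
    have hxlen : x.toNat < d.length := by rw [hlen]; omega
    have hxpg : PySem.List.pyGetD d x 0 = d.getD x.toNat 0 := by
      rw [PySem.List.pyGetD_eq_getElem d (0 : Int) hx.1 (by rw [hlen]; omega)]
      rw [List.getD_eq_getElem _ _ hxlen]
    rw [List.foldl_cons]
    by_cases hg : c + 1 < PySem.List.pyGetD d x 0
    · rw [if_pos hg]
      have hgx : c + 1 < d.getD x.toNat 0 := by rwa [hxpg] at hg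
      have hset : PySem.List.pySetD d x (c + 1) = d.set x.toNat (c + 1) :=
        PySem.List.pySetD_of_nonneg d (c + 1) hx.1
      set d' := d.set x.toNat (c + 1) with hd'
      set q' := q ++ [x] with hq'
      have hlen' : d'.length = (n + 1).toNat := by rw [hd', List.length_set, hlen]
      have hget' : ∀ k, d'.getD k 0 = if k = x.toNat then c + 1 else d.getD k 0 := by
        intro k; rw [hd']; exact pvGetD_set d k x.toNat hxlen (c + 1)
      have hmono : ∀ k, d'.getD k 0 ≤ d.getD k 0 := by
        intro k; rw [hget']
        split
        · next hk => subst hk; omega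
        · exact le_refl _
      have hxne1 : x.toNat ≠ 1 := by
        intro hh
        rw [hh, hd1] at hgx
        omega
      have hd1' : d'.getD 1 0 = 0 := by rw [hget', if_neg (by omega)]; exact hd1
      have hreachx : PvReach edge x (c + 1) := PvReach.step hreach hadj
      have hfin' : d'.getD x.toNat 0 < pvINF := by
        rw [hget', if_pos rfl]
        have := (hcore x.toNat hxlen).2.1
        omega
      have hcore' : ∀ j, j < d'.length → 0 ≤ d'.getD j 0 ∧ d'.getD j 0 ≤ pvINF ∧
          (d'.getD j 0 < pvINF → PvReach edge (j : Int) (d'.getD j 0)) := by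
        intro j hj
        rw [hget']
        split
        · next hk =>
          subst hk
          have hib := hcore x.toNat hxlen
          have hxc : ((x.toNat : Int)) = x := by omega
          refine ⟨by omega, by omega, fun _ => ?_⟩
          rw [hxc]; exact hreachx
        · exact hcore j (by rw [hlen]; rw [hlen'] at hj; exact hj)
      have hent' : ∀ v ∈ q', 0 ≤ v ∧ v ≤ n ∧ d'.getD v.toNat 0 < pvINF := by
        intro v hv
        rcases List.mem_append.mp hv with hvq | hvx
        · have := hent v hvq
          refine ⟨this.1, this.2.1, ?_⟩
          have := this.2.2
          have h2 := hmono v.toNat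
          omega
        · have hvx' : v = x := by simpa using hvx
          subst hvx'
          exact ⟨hx.1, hx.2, hfin'⟩
      have hJ' : ∀ j, j < d'.length → d'.getD j 0 < pvINF → ¬ (j = u.toNat) →
          ((j : Int) ∈ q'.drop i) ∨ PvClosed edge d' j := by
        intro j hj hfin hnex
        by_cases hjx : j = x.toNat
        · subst hjx
          left
          have hdrop : q'.drop i = q.drop i ++ [x] := List.drop_append_of_le_length hiq
          rw [hdrop]
          have hxc : ((x.toNat : Int)) = x := by omega
          rw [hxc]
          simp
        · have hfin0 : d.getD j 0 < pvINF := by rw [hget', if_neg hjx] at hfin; exact hfin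
          rcases hJ j (by rw [hlen]; rw [hlen'] at hj; exact hj) hfin0 hnex with hmem | hcl
          · left
            have hdrop : q'.drop i = q.drop i ++ [x] := List.drop_append_of_le_length hiq
            rw [hdrop]
            exact List.mem_append.mpr (Or.inl hmem)
          · right
            intro v hv
            have h1 := hcl v hv
            have h2 := hmono v.toNat
            rw [hget' j, if_neg hjx]
            omega
      have hdn' : d'.getD u.toNat 0 = c := by
        have hnx : u.toNat ≠ x.toNat := by
          intro hh
          rw [← hh, hdn] at hgx
          omega
        rw [hget', if_neg hnx]
        exact hdn
      have hres := ih (fun y hy => hlst y (List.mem_cons_of_mem x hy)) q' i d'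
        ⟨hlen', hd1', hcore', hent', hJ'⟩ hdn' (by rw [hq']; simp; omega)
      rw [hset]
      obtain ⟨hInvr, hdnr, hrelax, hmonor, ⟨e, he⟩, hmeas⟩ := hres
      refine ⟨hInvr, hdnr, ?_, ?_, ⟨x :: e, by rw [he, hq']; simp⟩, ?_⟩
      · intro y hy
        rcases List.mem_cons.mp hy with hyx | hyxs
        · subst hyx
          have := hmonor y.toNat
          rw [hget', if_pos rfl] at this
          exact this
        · exact hrelax y hyxs
      · intro k
        exact le_trans (hmonor k) (hmono k)
      · refine le_trans hmeas ?_
        have hsum : d'.sum = d.sum + (c + 1) - d[x.toNat]'hxlen := by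
          rw [hd']; exact pvSum_set d x.toNat hxlen (c + 1)
        have hgi : d[x.toNat]'hxlen = d.getD x.toNat 0 := (List.getD_eq_getElem d 0 hxlen).symm
        have hql : q'.length = q.length + 1 := by rw [hq']; simp
        rw [hsum, hgi, hql]
        push_cast
        omega
    · rw [if_neg hg]
      have hgx : d.getD x.toNat 0 ≤ c + 1 := by rw [hxpg] at hg; omega
      have hres := ih (fun y hy => hlst y (List.mem_cons_of_mem x hy)) q i d
        ⟨hlen, hd1, hcore, hent, hJ⟩ hdn hiq
      obtain ⟨hInvr, hdnr, hrelax, hmonor, he, hmeas⟩ := hres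
      refine ⟨hInvr, hdnr, ?_, hmonor, he, hmeas⟩
      intro y hy
      rcases List.mem_cons.mp hy with hyx | hyxs
      · subst hyx
        exact le_trans (hmonor y.toNat) hgx
      · exact hrelax y hyxs

theorem pvBfs_good {n : Int} {edge : List (Int × Int)} (hp : Pre_solution n edge) :
    ∀ (fuel : Nat) (q : List Int) (i : Nat) (d : List Int),
      i ≤ q.length →
      PvInvB n edge (fun _ => False) q i d →
      ((q.length : Int) - i) + d.sum < fuel →
      PvGood n edge (pvBfs (pvBuildAdj edge) fuel q i d) := by
  intro fuel
  induction fuel with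
  | zero =>
    intro q i d hiq hInv hM
    exfalso
    have h1 := pvSum_nonneg_of_core (n := n) hInv.2.2.1
    have h2 : (i : Int) ≤ (q.length : Int) := by exact_mod_cast hiq
    omega
  | succ f ihf =>
    intro q i d hiq hInv hM
    obtain ⟨hlen, hd1, hcore, hent, hJ⟩ := hInv
    rw [pvBfs]
    by_cases hlt : i < q.length
    · rw [dif_pos hlt]
      simp only []
      have humem : q[i] ∈ q := List.getElem_mem hlt
      have hu := hent q[i] humem
      have hu0 : (0 : Int) ≤ q[i] := hu.1
      have hun : q[i] ≤ n := hu.2.1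
      have hulen : (q[i]).toNat < d.length := by rw [hlen]; omega
      have hufin : d.getD (q[i]).toNat 0 < pvINF := hu.2.2
      have hreach : PvReach edge q[i] (d.getD (q[i]).toNat 0) := by
        have := (hcore (q[i]).toNat hulen).2.2 hufin
        have hcast : (((q[i]).toNat : Int)) = q[i] := by omega
        rwa [hcast] at this
      have hc0 : (0 : Int) ≤ d.getD (q[i]).toNat 0 := (hcore (q[i]).toNat hulen).1
      have hpgu : PySem.List.pyGetD d q[i] 0 = d.getD (q[i]).toNat 0 := by
        rw [PySem.List.pyGetD_eq_getElem d (0 : Int) hu0 (by rw [hlen]; omega)]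
        rw [List.getD_eq_getElem _ _ hulen]
      have hlst : ∀ x ∈ (pvBuildAdj edge).getD q[i] [], PvAdj edge q[i] x :=
        fun x hx => (pvBuildAdj_spec edge q[i] x).mp hx
      have hInvx : PvInvB n edge (fun j => j = (q[i]).toNat) q i d := by
        refine ⟨hlen, hd1, hcore, hent, fun j hj hfin _ => ?_⟩
        exact hJ j hj hfin (by simp)
      have hres := pvRelaxB hp hu0 hun hc0 hreach ((pvBuildAdj edge).getD q[i] [])
        hlst q i d hInvx rfl (le_of_lt hlt)
      rw [hpgu]
      obtain ⟨hInvr, hdnr, hrelax, hmonor, ⟨e, he⟩, hmeas⟩ := hres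
      obtain ⟨hlenr, hd1r, hcorer, hentr, hJr⟩ := hInvr
      apply ihf
      · rw [he]
        simp
        omega
      · refine ⟨hlenr, hd1r, hcorer, hentr, fun j hj hfin _ => ?_⟩
        by_cases hjn : j = (q[i]).toNat
        · right
          subst hjn
          intro v hv
          have hcast : (((q[i]).toNat : Int)) = q[i] := by omega
          rw [hcast] at hv
          have hvl : v ∈ (pvBuildAdj edge).getD q[i] [] := (pvBuildAdj_spec edge q[i] v).mpr hv
          have := hrelax v hvl
          rw [hdnr]
          omega
        · rcases hJr j hj hfin hjn with hmem | hcl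
          · left
            rw [he] at hmem ⊢
            rw [List.drop_append_of_le_length (le_of_lt hlt)] at hmem
            rw [List.drop_append_of_le_length (by omega)]
            rw [List.drop_eq_getElem_cons hlt] at hmem
            rcases List.mem_append.mp hmem with hmm | hme
            · rcases List.mem_cons.mp hmm with hh | hh
              · exfalso; apply hjn; omega
              · exact List.mem_append.mpr (Or.inl hh)
            · exact List.mem_append.mpr (Or.inr hme)
          · right; exact hcl
      · rw [he]
        have hql : ((q ++ e).length : Int) = q.length + e.length := by push_cast; simp
        rw [he] at hmeas
        push_cast at hmeas ⊢
        omega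
    · rw [dif_neg hlt]
      refine ⟨hlen, hd1, fun j hj => ⟨(hcore j hj).1, (hcore j hj).2.1, fun hfin => ?_⟩⟩
      refine ⟨(hcore j hj).2.2 hfin, ?_⟩
      rcases hJ j hj hfin (by simp) with hmem | hcl
      · exfalso
        rw [List.drop_eq_nil_iff.mpr (by omega)] at hmem
        simp at hmem
      · exact hcl

theorem pvInit_getD {n : Int} (hn : 1 ≤ n) :
    ∀ j, j < (n + 1).toNat →
      ((List.replicate (n + 1).toNat pvINF).set 1 0).getD j 0 = if j = 1 then 0 else pvINF := by
  intro j hj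
  have h1 : (1 : Nat) < (List.replicate (n + 1).toNat pvINF).length := by simp; omega
  rw [pvGetD_set _ j 1 h1 0]
  split
  · rfl
  · exact List.getD_replicate _ (by simpa using hj)


-- ===== VERDICT (by name: the statement is the Claim_ definition above) =====
theorem solution_spec : Claim_equal_solution := by
  intro n edge hdom hpre
  unfold Spec_solution
  have hn : 1 ≤ n := hpre.1
  have hN2 : 2 ≤ (n + 1).toNat := by omega
  have hd0s : PySem.List.pySetD (List.replicate (n + 1).toNat pvINF) (1 : Int) 0 =
      (List.replicate (n + 1).toNat pvINF).set 1 0 := by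
    rw [PySem.List.pySetD_of_nonneg _ _ (by norm_num)]
    rfl
  have hqa : pvHeappush [] ((0 : Int), (1 : Int)) = [((0 : Int), (1 : Int))] := by
    unfold pvHeappush
    rw [pvSiftdown]
    simp
  set d0 := (List.replicate (n + 1).toNat pvINF).set 1 0 with hd0
  have hlen0 : d0.length = (n + 1).toNat := by rw [hd0]; simp
  have hgd : ∀ j, j < (n + 1).toNat → d0.getD j 0 = if j = 1 then 0 else pvINF :=
    pvInit_getD hn
  have hd01 : d0.getD 1 0 = 0 := by rw [hgd 1 (by omega)]; simp
  have hcore0 : ∀ j, j < d0.length → 0 ≤ d0.getD j 0 ∧ d0.getD j 0 ≤ pvINF ∧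
      (d0.getD j 0 < pvINF → PvReach edge (j : Int) (d0.getD j 0)) := by
    intro j hj
    rw [hlen0] at hj
    rw [hgd j hj]
    split
    · next hj1 =>
      subst hj1
      refine ⟨by norm_num, by norm_num [pvINF], fun _ => ?_⟩
      exact_mod_cast PvReach.base (edge := edge)
    · exact ⟨by norm_num [pvINF], le_refl _, fun h => absurd h (by norm_num)⟩
  have hsum0 : d0.sum = ((n + 1).toNat : Int) * pvINF - pvINF := by
    rw [hd0]
    rw [pvSum_set _ 1 (by simp; omega) 0]
    rw [List.sum_replicate]
    rw [List.getElem_replicate]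
    rw [nsmul_eq_mul]
    ring
  have hfuel : (((n + 1).toNat * 1000000001 + 2 : Nat) : Int) =
      ((n + 1).toNat : Int) * 1000000001 + 2 := by push_cast; ring
  have hInvA : PvInvA n edge (fun _ => False) [((0 : Int), (1 : Int))] d0 := by
    refine ⟨hlen0, hd01, hcore0, ?_, ?_⟩
    · intro p hp
      have hp1 : p = ((0 : Int), (1 : Int)) := by simpa using hp
      subst hp1
      refine ⟨by norm_num, hn, le_refl _, PvReach.base, ?_⟩
      simp only []
      rw [show ((1 : Int)).toNat = 1 from rfl, hd01]
    · intro j hj hfin _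
      left
      rw [hlen0] at hj
      have hj1 : j = 1 := by
        by_contra hne
        rw [hgd j hj, if_neg hne] at hfin
        omega
      subst hj1
      refine ⟨0, by simp, by rw [hd01]⟩
  have hInvB : PvInvB n edge (fun _ => False) [(1 : Int)] 0 d0 := by
    refine ⟨hlen0, hd01, hcore0, ?_, ?_⟩
    · intro v hv
      have hv1 : v = (1 : Int) := by simpa using hv
      subst hv1
      refine ⟨by norm_num, hn, ?_⟩
      rw [show ((1 : Int)).toNat = 1 from rfl, hd01]
      norm_num [pvINF]
    · intro j hj hfin _
      left
      rw [hlen0] at hj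
      have hj1 : j = 1 := by
        by_contra hne
        rw [hgd j hj, if_neg hne] at hfin
        omega
      subst hj1
      simp
  have hMA : (([((0 : Int), (1 : Int))].length : Int)) + d0.sum <
      (((n + 1).toNat * 1000000001 + 2 : Nat) : Int) := by
    rw [hfuel, hsum0]
    have hX : (2 : Int) ≤ ((n + 1).toNat : Int) := by exact_mod_cast hN2
    simp only [List.length_cons, List.length_nil, pvINF]
    push_cast
    omega
  have hMB : ((([(1 : Int)].length : Int)) - (0 : Nat)) + d0.sum <
      (((n + 1).toNat * 1000000001 + 2 : Nat) : Int) := by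
    rw [hfuel, hsum0]
    have hX : (2 : Int) ≤ ((n + 1).toNat : Int) := by exact_mod_cast hN2
    simp only [List.length_cons, List.length_nil, pvINF]
    push_cast
    omega
  have hGoodA : PvGood n edge
      (pvDijkstra (pvBuildGraph edge (List.replicate (n + 1).toNat []))
        ((n + 1).toNat * 1000000001 + 2) [((0 : Int), (1 : Int))] d0) :=
    pvDijkstra_good hpre (pvBuildGraph_spec hpre).2 _ _ _ hInvA hMA
  have hGoodB : PvGood n edge
      (pvBfs (pvBuildAdj edge) ((n + 1).toNat * 1000000001 + 2) [(1 : Int)] 0 d0) :=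
    pvBfs_good hpre _ _ _ _ (by simp) hInvB hMB
  have hEq := pvGood_unique hpre hGoodA hGoodB
  have hA : solution n edge = pvAnswer
      (pvDijkstra (pvBuildGraph edge (List.replicate (n + 1).toNat []))
        ((n + 1).toNat * 1000000001 + 2) (pvHeappush [] (0, 1))
        (PySem.List.pySetD (List.replicate (n + 1).toNat pvINF) 1 0)) := rfl
  have hB : solution_alt n edge = pvAnswer
      (pvBfs (pvBuildAdj edge) ((n + 1).toNat * 1000000001 + 2) [1] 0
        (PySem.List.pySetD (List.replicate (n + 1).toNat pvINF) 1 0)) := rfl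
  rw [hA, hB, hd0s, hqa, hEq]
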